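-- pv_equiv track=rewrite | github.com/BharathHU/python-programming | anagram.py | strFilter
-- ===== SOURCE A (Python) =====
-- def strFilter(str):
--     newstr=""
--     for i in range(0,len(str)):
--         if "A" <= str[i] <="Z":
--             newstr=newstr+chr(ord(str[i])+32)
--         elif "a"<= str[i] <= "z" or "0" <= str[i] <= "9":
--             newstr=newstr+str[i]
--     return newstr
-- ===== SOURCE B (Python) =====
-- def strFilter(str):
--     # Table-driven: precompute a translation table over the 128 ASCII codes
--     # (non-alnum -> delete, 'A'-'Z' -> lowercase, others map to themselves),
--     # then let str.translate do the whole pass at once.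
--     table = {i: None for i in range(128)}
--     for i in range(10):
--         table[48 + i] = chr(48 + i)
--     for i in range(26):
--         table[65 + i] = chr(97 + i)
--         table[97 + i] = chr(97 + i)
--     return str.translate(table)
-- ===== Notes on version B (the rewrite author's own statement) =====
-- stated objective: alternative
-- what changed: Replaced A's per-character range-comparison branches with quadratic += concatenation by a precomputed 128-entry translation table (non-alnum->delete, upper->lower, digit/lower->self) applied in one str.translate call.
import Mathlib
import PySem

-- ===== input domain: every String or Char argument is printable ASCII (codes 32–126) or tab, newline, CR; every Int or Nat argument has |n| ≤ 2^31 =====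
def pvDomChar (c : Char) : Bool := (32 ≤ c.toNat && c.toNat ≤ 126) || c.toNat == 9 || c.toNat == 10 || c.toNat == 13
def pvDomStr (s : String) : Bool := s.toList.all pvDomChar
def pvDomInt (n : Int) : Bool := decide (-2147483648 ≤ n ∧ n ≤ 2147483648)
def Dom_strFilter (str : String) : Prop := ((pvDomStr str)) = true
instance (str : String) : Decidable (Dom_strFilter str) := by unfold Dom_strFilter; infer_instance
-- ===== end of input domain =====

-- B replaces A's per-character range branches by a precomputed 128-entry translation
-- table applied with str.translate (objective: alternative, table-driven).

-- ===== PORT A =====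
-- literal port: the index loop over range(0,len(str)) walks the characters in order,
-- so it is transcribed as a foldl over str.toList with the same accumulator and branches
def strFilter (str : String) : String :=
  String.ofList (str.toList.foldl (fun newstr c =>
    if 'A' ≤ c ∧ c ≤ 'Z' then newstr ++ [Char.ofNat (c.toNat + 32)]
    else if ('a' ≤ c ∧ c ≤ 'z') ∨ ('0' ≤ c ∧ c ≤ '9') then newstr ++ [c]
    else newstr) [])

-- ===== PORT B =====
-- Source B builds table = {i: None for i in range(128)}, then overwrites the digit,
-- uppercase and lowercase codes in two range loops; ported loop for loop
def bTable : PySem.Dict Int (Option Char) :=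
  let t0 := (PySem.List.pyRange 0 128 1).foldl (fun d i => d.insert i none) PySem.Dict.empty
  let t1 := (PySem.List.pyRange 0 10 1).foldl (fun d i =>
      d.insert (48 + i) (some (Char.ofNat (48 + i).toNat))) t0
  (PySem.List.pyRange 0 26 1).foldl (fun d i =>
      (d.insert (65 + i) (some (Char.ofNat (97 + i).toNat))).insert (97 + i)
        (some (Char.ofNat (97 + i).toNat))) t1

-- str.translate(table), ported by hand: each character's code is looked up in the
-- table — a None value deletes it, a char value replaces it, an absent code keeps
-- it (exact for Python's translate with this table on any input)
def strFilter_alt (str : String) : String :=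
  String.ofList (str.toList.flatMap (fun c =>
    match bTable.get? (c.toNat : Int) with
    | some none => []
    | some (some d) => [d]
    | none => [c]))

-- ===== PRECONDITION & SPEC =====
def Spec_strFilter (str : String) (out : String) : Prop := out = strFilter_alt str
instance (str : String) (out : String) : Decidable (Spec_strFilter str out) := by unfold Spec_strFilter; infer_instance

-- ===== CLAIM (what is proved, stated in full; the proofs are below) =====
def Claim_equal_strFilter : Prop := ∀ (str : String), Dom_strFilter str → Spec_strFilter str (strFilter str)

-- ===== LEMMAS AND PROOFS =====

-- closed form of bTable's value at each ASCII code
def tableVal (n : Nat) : Option Char :=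
  if 48 ≤ n ∧ n ≤ 57 then some (Char.ofNat n)
  else if 65 ≤ n ∧ n ≤ 90 then some (Char.ofNat (n + 32))
  else if 97 ≤ n ∧ n ≤ 122 then some (Char.ofNat n)
  else none

set_option maxRecDepth 4096 in
theorem bTable_lookup_all :
    ((List.range 128).all (fun n => bTable.get? (n : Int) == some (tableVal n))) = true := by
  decide

theorem bTable_lookup {n : Nat} (h : n < 128) : bTable.get? (n : Int) = some (tableVal n) := by
  have := List.all_eq_true.mp bTable_lookup_all n (List.mem_range.mpr h)
  exact eq_of_beq this

-- what A appends for one character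
def aEmit (c : Char) : List Char :=
  if 'A' ≤ c ∧ c ≤ 'Z' then [Char.ofNat (c.toNat + 32)]
  else if ('a' ≤ c ∧ c ≤ 'z') ∨ ('0' ≤ c ∧ c ≤ '9') then [c]
  else []

-- what B emits for one character
def bEmit (c : Char) : List Char :=
  match bTable.get? (c.toNat : Int) with
  | some none => []
  | some (some d) => [d]
  | none => [c]

theorem emit_eq (c : Char) (hdom : pvDomChar c = true) : aEmit c = bEmit c := by
  have h128 : c.toNat < 128 := by simp [pvDomChar] at hdom; omega
  have hA : ('A' ≤ c ∧ c ≤ 'Z') ↔ (65 ≤ c.toNat ∧ c.toNat ≤ 90) := by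
    simp only [Char.le_def, UInt32.le_iff_toNat_le, Char.toNat_val]
    exact Iff.rfl
  have hLD : (('a' ≤ c ∧ c ≤ 'z') ∨ ('0' ≤ c ∧ c ≤ '9')) ↔
      ((97 ≤ c.toNat ∧ c.toNat ≤ 122) ∨ (48 ≤ c.toNat ∧ c.toNat ≤ 57)) := by
    simp only [Char.le_def, UInt32.le_iff_toNat_le, Char.toNat_val]
    exact Iff.rfl
  unfold aEmit bEmit
  rw [bTable_lookup h128]
  unfold tableVal
  simp only [hA, hLD]
  split_ifs <;>
    first
      | (exfalso; omega)
      | simp [Char.ofNat_toNat]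

-- ===== VERDICT (by name: the statement is the Claim_ definition above) =====
set_option maxRecDepth 8192 in
theorem strFilter_spec : Claim_equal_strFilter := by
  intro str hdom
  unfold Spec_strFilter strFilter strFilter_alt
  have hstep : (fun (newstr : List Char) c =>
      if 'A' ≤ c ∧ c ≤ 'Z' then newstr ++ [Char.ofNat (c.toNat + 32)]
      else if ('a' ≤ c ∧ c ≤ 'z') ∨ ('0' ≤ c ∧ c ≤ '9') then newstr ++ [c]
      else newstr) = fun newstr c => newstr ++ aEmit c := by
    funext newstr c
    unfold aEmit
    split_ifs <;> simp
  rw [hstep, PySem.List.foldl_append_eq_flatMap, List.nil_append]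
  have hcong : str.toList.flatMap aEmit = str.toList.flatMap bEmit := by
    apply List.flatMap_congr
    intro c hc
    exact emit_eq c (List.all_eq_true.mp hdom c hc)
  show String.ofList (str.toList.flatMap aEmit) = String.ofList (str.toList.flatMap bEmit)
  exact congrArg String.ofList hcong
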